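-- pv_equiv track=rewrite | github.com/drithird/AdventofCode | adventofcode/day6/pt1.py | calculate_possible_wins_and_losses
-- ===== SOURCE A (Python) =====
-- def calculate_possible_wins_and_losses(total_time,distance):
--     time_held = 1
--     losses = []
--     wins = []
--     while time_held < total_time:
--         time_running = total_time - time_held
--         if time_held * time_running > distance:
--             wins.append((time_held,time_held*time_running))
--         else:
--             losses.append((time_held,time_running*time_held))
--         time_held += 1
--     return wins,losses
-- ===== SOURCE B (Python) =====
-- def calculate_possible_wins_and_losses(total_time, distance):
--     def beats(t):
--         return t * (total_time - t) > distance
--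
--     # find the first winning hold time scanning up from 1
--     first = 1
--     while first < total_time and not beats(first):
--         first += 1
--     if first >= total_time:
--         # no hold time wins: every hold time loses
--         return [], [(t, t * (total_time - t)) for t in range(1, total_time)]
--     # find the last winning hold time scanning down from total_time - 1
--     last = total_time - 1
--     while last > first and not beats(last):
--         last -= 1
--     # winning hold times form one contiguous block [first, last]
--     wins = [(t, t * (total_time - t)) for t in range(first, last + 1)]
--     losses = [(t, t * (total_time - t)) for t in range(1, first)] + \
--              [(t, t * (total_time - t)) for t in range(last + 1, total_time)]
--     return wins, losses
-- ===== Notes on version B (the rewrite author's own statement) =====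
-- stated objective: alternative
-- what changed: Instead of testing every hold time in one partition loop, B finds the first and last winning hold times by boundary scans, uses concavity of t*(total_time-t) to know the winning times form one contiguous block, and emits wins and losses as range comprehensions.
import Mathlib
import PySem

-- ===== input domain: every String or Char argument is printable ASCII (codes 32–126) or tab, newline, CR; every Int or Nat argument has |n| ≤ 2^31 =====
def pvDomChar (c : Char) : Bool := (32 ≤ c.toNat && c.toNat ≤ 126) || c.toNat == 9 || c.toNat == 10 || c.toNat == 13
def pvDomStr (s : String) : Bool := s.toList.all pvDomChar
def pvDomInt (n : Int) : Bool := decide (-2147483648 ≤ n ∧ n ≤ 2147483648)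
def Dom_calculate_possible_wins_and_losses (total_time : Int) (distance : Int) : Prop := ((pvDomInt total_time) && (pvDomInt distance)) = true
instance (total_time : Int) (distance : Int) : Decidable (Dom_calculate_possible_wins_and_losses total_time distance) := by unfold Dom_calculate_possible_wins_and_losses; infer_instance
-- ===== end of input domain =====

-- B finds the winning interval by boundary scans and emits both lists as ranges (alternative decomposition, same cost).

-- ===== PORT A =====
-- A's while loop: state (wins, losses, time_held)
def pvALoop (total_time distance time_held : Int) (wins losses : List (Int × Int)) :
    (List (Int × Int)) × (List (Int × Int)) :=
  if _h : time_held < total_time then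
    let time_running := total_time - time_held
    if time_held * time_running > distance then
      pvALoop total_time distance (time_held + 1) (wins ++ [(time_held, time_held * time_running)]) losses
    else
      pvALoop total_time distance (time_held + 1) wins (losses ++ [(time_held, time_running * time_held)])
  else (wins, losses)
termination_by (total_time - time_held).toNat
decreasing_by all_goals omega

def calculate_possible_wins_and_losses (total_time : Int) (distance : Int) : (List (Int × Int)) × (List (Int × Int)) :=
  pvALoop total_time distance 1 [] []

-- ===== PORT B =====
-- B's 'while first < total_time and not beats(first): first += 1'
def pvFirstScan (total_time distance first : Int) : Int :=
  if _h : first < total_time ∧ ¬ (first * (total_time - first) > distance) then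
    pvFirstScan total_time distance (first + 1)
  else first
termination_by (total_time - first).toNat
decreasing_by omega

-- B's 'while last > first and not beats(last): last -= 1'
def pvLastScan (total_time distance first last : Int) : Int :=
  if _h : last > first ∧ ¬ (last * (total_time - last) > distance) then
    pvLastScan total_time distance first (last - 1)
  else last
termination_by (last - first).toNat
decreasing_by omega

-- B's '(t, t * (total_time - t))'
def pvEmit (total_time t : Int) : Int × Int := (t, t * (total_time - t))

def calculate_possible_wins_and_losses_alt (total_time : Int) (distance : Int) : (List (Int × Int)) × (List (Int × Int)) :=
  let first := pvFirstScan total_time distance 1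
  if first ≥ total_time then
    ([], (PySem.List.pyRange 1 total_time 1).map (pvEmit total_time))
  else
    let last := pvLastScan total_time distance first (total_time - 1)
    ((PySem.List.pyRange first (last + 1) 1).map (pvEmit total_time),
     (PySem.List.pyRange 1 first 1).map (pvEmit total_time) ++
       (PySem.List.pyRange (last + 1) total_time 1).map (pvEmit total_time))

-- ===== PRECONDITION & SPEC =====
def Spec_calculate_possible_wins_and_losses (total_time : Int) (distance : Int) (out : (List (Int × Int)) × (List (Int × Int))) : Prop := out = calculate_possible_wins_and_losses_alt total_time distance
instance (total_time : Int) (distance : Int) (out : (List (Int × Int)) × (List (Int × Int))) : Decidable (Spec_calculate_possible_wins_and_losses total_time distance out) := by unfold Spec_calculate_possible_wins_and_losses; infer_instance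

-- ===== CLAIM (what is proved, stated in full; the proofs are below) =====
def Claim_equal_calculate_possible_wins_and_losses : Prop := ∀ (total_time : Int) (distance : Int), Dom_calculate_possible_wins_and_losses total_time distance → Spec_calculate_possible_wins_and_losses total_time distance (calculate_possible_wins_and_losses total_time distance)

-- ===== LEMMAS AND PROOFS =====

-- A's loop appends exactly the winners / losers of the remaining range
theorem pvALoop_eq (total_time distance t : Int) (ws ls : List (Int × Int)) :
    pvALoop total_time distance t ws ls =
      (ws ++ ((PySem.List.pyRange t total_time 1).filter
          (fun x => decide (x * (total_time - x) > distance))).map (pvEmit total_time),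
       ls ++ ((PySem.List.pyRange t total_time 1).filter
          (fun x => ! decide (x * (total_time - x) > distance))).map (pvEmit total_time)) := by
  fun_induction pvALoop total_time distance t ws ls with
  | case1 t ws ls h tr hc ih =>
      rw [ih, PySem.List.pyRange_one_cons h]
      have hc' : distance < t * (total_time - t) := hc
      simp [hc', pvEmit]
      exact Or.inl rfl
  | case2 t ws ls h tr hc ih =>
      rw [ih, PySem.List.pyRange_one_cons h]
      have hc' : ¬ distance < t * (total_time - t) := hc
      simp [hc', pvEmit, mul_comm]
      exact Or.inl rfl
  | case3 t ws ls h =>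
      rw [PySem.List.pyRange_one_eq_nil (by omega)]
      simp

theorem pvFirstScan_spec (total_time distance a : Int) :
    a ≤ pvFirstScan total_time distance a ∧
    (pvFirstScan total_time distance a < total_time →
      pvFirstScan total_time distance a * (total_time - pvFirstScan total_time distance a) > distance) ∧
    (∀ s, a ≤ s → s < pvFirstScan total_time distance a → ¬ (s * (total_time - s) > distance)) := by
  fun_induction pvFirstScan total_time distance a with
  | case1 a h ih =>
      refine ⟨by omega, ih.2.1, ?_⟩
      intro s hs1 hs2
      rcases eq_or_lt_of_le hs1 with rfl | hlt
      · exact h.2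
      · exact ih.2.2 s (by omega) hs2
  | case2 a h =>
      refine ⟨le_refl _, ?_, fun s hs1 hs2 => absurd hs2 (by omega)⟩
      intro hlt
      by_contra hb
      exact h ⟨hlt, hb⟩

theorem pvLastScan_spec (total_time distance fst b : Int) (hfb : fst ≤ b) :
    fst ≤ pvLastScan total_time distance fst b ∧
    pvLastScan total_time distance fst b ≤ b ∧
    (pvLastScan total_time distance fst b > fst →
      pvLastScan total_time distance fst b * (total_time - pvLastScan total_time distance fst b) > distance) ∧
    (∀ s, pvLastScan total_time distance fst b < s → s ≤ b → ¬ (s * (total_time - s) > distance)) := by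
  fun_induction pvLastScan total_time distance fst b with
  | case1 b h ih =>
      have ih' := ih (by omega)
      refine ⟨ih'.1, by omega, ih'.2.2.1, ?_⟩
      intro s hs1 hs2
      rcases eq_or_lt_of_le hs2 with rfl | hlt
      · exact h.2
      · exact ih'.2.2.2 s hs1 (by omega)
  | case2 b h =>
      refine ⟨?_, le_refl _, ?_, fun s hs1 hs2 => absurd hs2 (by omega)⟩
      · omega
      · intro hlt
        by_contra hb
        exact h ⟨hlt, hb⟩

-- concavity of t*(T-t): above a threshold at both endpoints ⇒ above it in between
theorem pvConcave (T d a b t : Int) (ha : a * (T - a) > d) (hb : b * (T - b) > d)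
    (h1 : a ≤ t) (h2 : t ≤ b) : t * (T - t) > d := by
  by_cases h : a + t ≤ T
  · nlinarith [mul_nonneg (sub_nonneg.2 h1) (by omega : (0:Int) ≤ T - a - t)]
  · nlinarith [mul_nonneg (sub_nonneg.2 h2) (by omega : (0:Int) ≤ t + b - T)]

-- ===== VERDICT (by name: the statement is the Claim_ definition above) =====
theorem calculate_possible_wins_and_losses_spec : Claim_equal_calculate_possible_wins_and_losses := by
  intro T d _
  unfold Spec_calculate_possible_wins_and_losses
  rw [calculate_possible_wins_and_losses, pvALoop_eq]
  unfold calculate_possible_wins_and_losses_alt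
  obtain ⟨hF1, hFbeats, hFnone⟩ := pvFirstScan_spec T d 1
  by_cases hcase : pvFirstScan T d 1 ≥ T
  · rw [if_pos hcase]
    have hwin : (PySem.List.pyRange 1 T 1).filter
        (fun x => decide (x * (T - x) > d)) = [] := by
      refine List.filter_eq_nil_iff.mpr ?_
      intro x hx
      rw [PySem.List.mem_pyRange_one] at hx
      simpa using hFnone x hx.1 (by omega)
    have hloss : (PySem.List.pyRange 1 T 1).filter
        (fun x => ! decide (x * (T - x) > d)) = PySem.List.pyRange 1 T 1 := by
      refine List.filter_eq_self.mpr ?_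
      intro x hx
      rw [PySem.List.mem_pyRange_one] at hx
      simpa using hFnone x hx.1 (by omega)
    rw [hwin, hloss]
    simp
  · rw [if_neg hcase]
    have hFT : pvFirstScan T d 1 < T := by omega
    have hbF := hFbeats hFT
    obtain ⟨hL1, hL2, hLb, hLnone⟩ := pvLastScan_spec T d (pvFirstScan T d 1) (T - 1) (by omega)
    have hbL : pvLastScan T d (pvFirstScan T d 1) (T - 1) *
        (T - pvLastScan T d (pvFirstScan T d 1) (T - 1)) > d := by
      rcases eq_or_lt_of_le hL1 with heq | hlt
      · rw [← heq]; exact hbF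
      · exact hLb hlt
    rw [PySem.List.pyRange_one_append 1 (pvFirstScan T d 1) T (by omega) (by omega),
        PySem.List.pyRange_one_append (pvFirstScan T d 1)
          (pvLastScan T d (pvFirstScan T d 1) (T - 1) + 1) T (by omega) (by omega)]
    have hlow : ((PySem.List.pyRange 1 (pvFirstScan T d 1) 1).filter
        (fun x => decide (x * (T - x) > d))) = [] := by
      refine List.filter_eq_nil_iff.mpr ?_
      intro x hx
      rw [PySem.List.mem_pyRange_one] at hx
      simpa using hFnone x hx.1 hx.2
    have hlow' : ((PySem.List.pyRange 1 (pvFirstScan T d 1) 1).filter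
        (fun x => ! decide (x * (T - x) > d))) = PySem.List.pyRange 1 (pvFirstScan T d 1) 1 := by
      refine List.filter_eq_self.mpr ?_
      intro x hx
      rw [PySem.List.mem_pyRange_one] at hx
      simpa using hFnone x hx.1 hx.2
    have hmid : ((PySem.List.pyRange (pvFirstScan T d 1)
        (pvLastScan T d (pvFirstScan T d 1) (T - 1) + 1) 1).filter
        (fun x => decide (x * (T - x) > d))) = PySem.List.pyRange (pvFirstScan T d 1)
          (pvLastScan T d (pvFirstScan T d 1) (T - 1) + 1) 1 := by
      refine List.filter_eq_self.mpr ?_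
      intro x hx
      rw [PySem.List.mem_pyRange_one] at hx
      simpa using pvConcave T d _ _ x hbF hbL hx.1 (by omega)
    have hmid' : ((PySem.List.pyRange (pvFirstScan T d 1)
        (pvLastScan T d (pvFirstScan T d 1) (T - 1) + 1) 1).filter
        (fun x => ! decide (x * (T - x) > d))) = [] := by
      refine List.filter_eq_nil_iff.mpr ?_
      intro x hx
      rw [PySem.List.mem_pyRange_one] at hx
      simpa using pvConcave T d _ _ x hbF hbL hx.1 (by omega)
    have hhigh : ((PySem.List.pyRange (pvLastScan T d (pvFirstScan T d 1) (T - 1) + 1) T 1).filter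
        (fun x => decide (x * (T - x) > d))) = [] := by
      refine List.filter_eq_nil_iff.mpr ?_
      intro x hx
      rw [PySem.List.mem_pyRange_one] at hx
      simpa using hLnone x (by omega) (by omega)
    have hhigh' : ((PySem.List.pyRange (pvLastScan T d (pvFirstScan T d 1) (T - 1) + 1) T 1).filter
        (fun x => ! decide (x * (T - x) > d))) =
          PySem.List.pyRange (pvLastScan T d (pvFirstScan T d 1) (T - 1) + 1) T 1 := by
      refine List.filter_eq_self.mpr ?_
      intro x hx
      rw [PySem.List.mem_pyRange_one] at hx
      simpa using hLnone x (by omega) (by omega)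
    rw [List.filter_append, List.filter_append, List.filter_append, List.filter_append,
        hlow, hlow', hmid, hmid', hhigh, hhigh']
    simp
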